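-- pv_equiv track=rewrite | github.com/Dirakon/Aerospace-Swallow | main.py | try_get_two_ps_fields
-- ===== SOURCE A (Python) =====
-- def try_get_two_ps_fields(ps_line):
--     first_word = ''
--     second_word = None
--     for c in ps_line:
--         if (c == ' '):
--             if (len(first_word) > 0) and (second_word is None):
--                 second_word = ''
--         elif second_word is None:
--             first_word += c
--         else:
--             second_word += c
--     if (second_word is not None) and len(second_word) > 0:
--         return (first_word, second_word)
--     return None
-- ===== SOURCE B (Python) =====
-- def try_get_two_ps_fields(ps_line):
--     stripped = ps_line.lstrip(' ')
--     i = stripped.find(' ')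
--     if i == -1:
--         return None
--     first_word = stripped[:i]
--     second_word = stripped[i + 1:].replace(' ', '')
--     if second_word == '':
--         return None
--     return (first_word, second_word)
-- ===== Notes on version B (the rewrite author's own statement) =====
-- stated objective: simpler
-- what changed: Replaced the char-by-char two-variable state machine with direct string operations: a space-only lstrip, one find, two slices and a replace.
import Mathlib
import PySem

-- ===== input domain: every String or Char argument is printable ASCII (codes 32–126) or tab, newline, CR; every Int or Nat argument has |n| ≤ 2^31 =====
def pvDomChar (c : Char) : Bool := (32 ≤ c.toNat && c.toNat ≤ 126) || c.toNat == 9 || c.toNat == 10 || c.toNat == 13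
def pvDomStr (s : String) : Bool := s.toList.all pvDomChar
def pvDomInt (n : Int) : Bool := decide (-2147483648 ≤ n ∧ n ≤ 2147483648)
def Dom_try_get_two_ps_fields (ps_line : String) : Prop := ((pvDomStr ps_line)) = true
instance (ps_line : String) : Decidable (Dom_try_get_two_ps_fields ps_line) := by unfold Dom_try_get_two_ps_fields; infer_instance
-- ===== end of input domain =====

-- ===== PORT A =====
-- state machine of A: (first_word, second_word : Option) updated per character
def pvAStep (st : List Char × Option (List Char)) (c : Char) : List Char × Option (List Char) :=
  if c = ' ' then
    if st.1.length > 0 ∧ st.2 = none then (st.1, some []) else st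
  else
    match st.2 with
    | none => (st.1 ++ [c], none)
    | some s => (st.1, some (s ++ [c]))

def try_get_two_ps_fields (ps_line : String) : Option (String × String) :=
  let st := ps_line.toList.foldl pvAStep ([], none)
  match st.2 with
  | some s => if s.length > 0 then some (String.mk st.1, String.mk s) else none
  | none => none

-- ===== PORT B =====
-- Source B: stripped = ps_line.lstrip(' '); i = stripped.find(' '); slices + replace(' ','')
def try_get_two_ps_fields_alt (ps_line : String) : Option (String × String) :=
  let stripped := ps_line.toList.dropWhile (· = ' ')   -- lstrip(' ')
  if ' ' ∈ stripped then                               -- find(' ') ≠ -1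
    let first_word := stripped.takeWhile (· ≠ ' ')     -- stripped[:i]
    let second_word := (stripped.drop (first_word.length + 1)).filter (· ≠ ' ')  -- stripped[i+1:].replace(' ','')
    if second_word = [] then none
    else some (String.mk first_word, String.mk second_word)
  else none

-- ===== PRECONDITION & SPEC =====
def Spec_try_get_two_ps_fields (ps_line : String) (out : Option (String × String)) : Prop := out = try_get_two_ps_fields_alt ps_line
instance (ps_line : String) (out : Option (String × String)) : Decidable (Spec_try_get_two_ps_fields ps_line out) := by unfold Spec_try_get_two_ps_fields; infer_instance

-- ===== CLAIM (what is proved, stated in full; the proofs are below) =====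
def Claim_equal_try_get_two_ps_fields : Prop := ∀ (ps_line : String), Dom_try_get_two_ps_fields ps_line → Spec_try_get_two_ps_fields ps_line (try_get_two_ps_fields ps_line)

-- ===== LEMMAS AND PROOFS =====

-- once second_word is set, spaces are ignored and non-spaces appended
theorem pvA_some (l : List Char) (fw s : List Char) :
    l.foldl pvAStep (fw, some s) = (fw, some (s ++ l.filter (· ≠ ' '))) := by
  induction l generalizing s with
  | nil => simp
  | cons c t ih =>
    by_cases hc : c = ' ' <;> simp [pvAStep, hc, ih]

-- with a nonempty first word and no second word yet, the fold is takeWhile/drop/filter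
theorem pvA_none (l : List Char) (fw : List Char) (h : fw ≠ []) :
    l.foldl pvAStep (fw, none) =
      (fw ++ l.takeWhile (· ≠ ' '),
       if ' ' ∈ l then some ((l.drop ((l.takeWhile (· ≠ ' ')).length + 1)).filter (· ≠ ' ')) else none) := by
  induction l generalizing fw with
  | nil => simp
  | cons c t ih =>
    by_cases hc : c = ' '
    · subst hc
      simp [pvAStep, List.length_pos_iff.mpr h, pvA_some, List.takeWhile]
    · have hne : ¬ (' ' = c) := fun h' => hc h'.symm
      simp only [List.foldl_cons, pvAStep, if_neg hc, ih (fw ++ [c]) (by simp),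
        List.takeWhile, List.mem_cons, hne, false_or]
      simp [hc, List.append_assoc]

-- leading spaces are skipped by A's fold
theorem pvA_drop (l : List Char) :
    l.foldl pvAStep ([], none) = (l.dropWhile (· = ' ')).foldl pvAStep ([], none) := by
  induction l with
  | nil => rfl
  | cons c t ih =>
    by_cases hc : c = ' '
    · simpa [pvAStep, hc, List.dropWhile] using ih
    · simp [List.dropWhile, hc]

-- the head of a dropWhile result falsifies the predicate
theorem pvDropWhile_head {p : Char → Bool} (l : List Char) (c : Char) (t : List Char)
    (h : l.dropWhile p = c :: t) : p c = false := by
  induction l with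
  | nil => simp at h
  | cons a s ih =>
    by_cases ha : p a
    · rw [List.dropWhile_cons_of_pos ha] at h; exact ih h
    · rw [List.dropWhile_cons_of_neg ha] at h
      cases h; simpa using ha

-- ===== VERDICT (by name: the statement is the Claim_ definition above) =====
theorem try_get_two_ps_fields_spec : Claim_equal_try_get_two_ps_fields := by
  intro ps_line _
  unfold Spec_try_get_two_ps_fields try_get_two_ps_fields try_get_two_ps_fields_alt
  rw [pvA_drop]
  generalize hs : ps_line.toList.dropWhile (· = ' ') = l
  cases l with
  | nil => simp
  | cons c t =>
    have hc : c ≠ ' ' := by simpa using pvDropWhile_head _ _ _ hs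
    have hfold : (c :: t).foldl pvAStep ([], none) = t.foldl pvAStep ([c], none) := by
      simp [pvAStep, hc]
    rw [hfold, pvA_none t [c] (by simp)]
    by_cases hm : ' ' ∈ t
    · have hm' : ' ' ∈ c :: t := List.mem_cons_of_mem _ hm
      have htw : (c :: t).takeWhile (· ≠ ' ') = c :: t.takeWhile (· ≠ ' ') := by
        simp [List.takeWhile, hc]
      have hdrop : (c :: t).drop ((c :: t.takeWhile (· ≠ ' ')).length + 1)
          = t.drop ((t.takeWhile (· ≠ ' ')).length + 1) := by
        simp
      simp only [hm, hm', if_pos, htw, hdrop]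
      generalize (t.drop ((t.takeWhile (· ≠ ' ')).length + 1)).filter (· ≠ ' ') = s
      cases s <;> simp
    · have hne : ' ' ≠ c := Ne.symm hc
      have hm' : ' ' ∉ c :: t := by simp [hm, hne]
      simp [hm, hm']
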